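-- pv_equiv track=rewrite | github.com/BoyuHan666/KNN-and-DT | data_exploring.py | summary_binary_data2
-- ===== SOURCE A (Python) =====
-- def summary_binary_data2(x,y):
--     dic = {"0-0":0,"0-1":0,"1-0":0,"1-1":0} # in data2 0:False 1:True
--     for k in range(len(x)):
--         i = x[k]
--         j = y[k]
--         if i == 0 and j == 0:
--             dic["0-0"] += 1
--         if i == 0 and j == 1:
--             dic["0-1"] += 1
--         if i == 1 and j == 0:
--             dic["1-0"] += 1
--         if i == 1 and j == 1:
--             dic["1-1"] += 1
--     return dic
-- ===== SOURCE B (Python) =====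
-- def summary_binary_data2(x, y):
--     n = len(x)
--     return {
--         "0-0": sum(1 for k in range(n) if x[k] == 0 and y[k] == 0),
--         "0-1": sum(1 for k in range(n) if x[k] == 0 and y[k] == 1),
--         "1-0": sum(1 for k in range(n) if x[k] == 1 and y[k] == 0),
--         "1-1": sum(1 for k in range(n) if x[k] == 1 and y[k] == 1),
--     }
-- ===== Notes on version B (the rewrite author's own statement) =====
-- stated objective: alternative
-- what changed: Replaces A's single pass that updates a mutable 4-key dict with four independent counting scans, one per contingency cell, assembled directly into the result dict.
import Mathlib
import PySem

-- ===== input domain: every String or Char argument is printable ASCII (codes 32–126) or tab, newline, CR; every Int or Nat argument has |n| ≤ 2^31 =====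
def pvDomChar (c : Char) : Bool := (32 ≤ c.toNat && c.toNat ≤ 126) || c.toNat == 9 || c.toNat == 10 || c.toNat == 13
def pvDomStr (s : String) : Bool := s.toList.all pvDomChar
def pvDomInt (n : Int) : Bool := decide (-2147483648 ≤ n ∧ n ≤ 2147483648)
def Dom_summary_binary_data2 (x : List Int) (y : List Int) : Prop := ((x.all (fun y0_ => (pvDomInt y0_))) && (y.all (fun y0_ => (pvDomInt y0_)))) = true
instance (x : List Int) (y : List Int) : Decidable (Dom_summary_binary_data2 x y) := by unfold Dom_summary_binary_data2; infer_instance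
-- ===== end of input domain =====

-- B replaces A's single pass over a mutable 4-key dict with four independent per-cell counting scans (alternative decomposition, same cost).


-- ===== PORT A =====
-- the loop body: i = x[k]; j = y[k]; four independent if-updates on the dict
-- (pyGet? … |>.getD 0 never takes the default inside Pre_, where every index is in range)
def pvStepA (x : List Int) (y : List Int) (dic : PySem.Dict String Int) (k : Int) : PySem.Dict String Int :=
  let i := (PySem.List.pyGet? x k).getD 0
  let j := (PySem.List.pyGet? y k).getD 0
  let dic := if i = 0 ∧ j = 0 then dic.modify "0-0" 0 (· + 1) else dic
  let dic := if i = 0 ∧ j = 1 then dic.modify "0-1" 0 (· + 1) else dic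
  let dic := if i = 1 ∧ j = 0 then dic.modify "1-0" 0 (· + 1) else dic
  let dic := if i = 1 ∧ j = 1 then dic.modify "1-1" 0 (· + 1) else dic
  dic

def summary_binary_data2 (x : List Int) (y : List Int) : List (String × Int) :=
  ((PySem.List.pyRange 0 (x.length : Int) 1).foldl (pvStepA x y)
    (PySem.Dict.ofList [("0-0", 0), ("0-1", 0), ("1-0", 0), ("1-1", 0)])).items

-- ===== PORT B =====
-- predicate of one comprehension: x[k] == a and y[k] == b
def pvHit (x : List Int) (y : List Int) (a : Int) (b : Int) (k : Int) : Bool :=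
  ((PySem.List.pyGet? x k).getD 0 == a) && ((PySem.List.pyGet? y k).getD 0 == b)

def summary_binary_data2_alt (x : List Int) (y : List Int) : List (String × Int) :=
  let n : Int := (x.length : Int)
  [("0-0", ((PySem.List.pyRange 0 n 1).countP (pvHit x y 0 0) : Int)),
   ("0-1", ((PySem.List.pyRange 0 n 1).countP (pvHit x y 0 1) : Int)),
   ("1-0", ((PySem.List.pyRange 0 n 1).countP (pvHit x y 1 0) : Int)),
   ("1-1", ((PySem.List.pyRange 0 n 1).countP (pvHit x y 1 1) : Int))]

-- ===== PRECONDITION & SPEC =====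
-- Pre_ excludes len(y) < len(x), where both Pythons raise IndexError at y[k].
def Pre_summary_binary_data2 (x : List Int) (y : List Int) : Prop := x.length ≤ y.length
instance (x : List Int) (y : List Int) : Decidable (Pre_summary_binary_data2 x y) := by unfold Pre_summary_binary_data2; infer_instance
def pvWitness_summary_binary_data2 : List Int × List Int := ([0, 1, 1, 2], [1, 1, 0, 0])
def Spec_summary_binary_data2 (x : List Int) (y : List Int) (out : List (String × Int)) : Prop := out = summary_binary_data2_alt x y
instance (x : List Int) (y : List Int) (out : List (String × Int)) : Decidable (Spec_summary_binary_data2 x y out) := by unfold Spec_summary_binary_data2; infer_instance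

-- ===== CLAIM (what is proved, stated in full; the proofs are below) =====
def Claim_equal_summary_binary_data2 : Prop := ∀ (x : List Int) (y : List Int), Dom_summary_binary_data2 x y → Pre_summary_binary_data2 x y → Spec_summary_binary_data2 x y (summary_binary_data2 x y)

-- ===== LEMMAS AND PROOFS =====
-- Dict.modify on the literal 4-key dict, evaluated (values stay symbolic)
theorem pvMod00 (a b c d : Int) :
    (PySem.Dict.mk [("0-0", a), ("0-1", b), ("1-0", c), ("1-1", d)]).modify "0-0" 0 (· + 1)
      = PySem.Dict.mk [("0-0", a + 1), ("0-1", b), ("1-0", c), ("1-1", d)] := rfl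
theorem pvMod01 (a b c d : Int) :
    (PySem.Dict.mk [("0-0", a), ("0-1", b), ("1-0", c), ("1-1", d)]).modify "0-1" 0 (· + 1)
      = PySem.Dict.mk [("0-0", a), ("0-1", b + 1), ("1-0", c), ("1-1", d)] := rfl
theorem pvMod10 (a b c d : Int) :
    (PySem.Dict.mk [("0-0", a), ("0-1", b), ("1-0", c), ("1-1", d)]).modify "1-0" 0 (· + 1)
      = PySem.Dict.mk [("0-0", a), ("0-1", b), ("1-0", c + 1), ("1-1", d)] := rfl
theorem pvMod11 (a b c d : Int) :
    (PySem.Dict.mk [("0-0", a), ("0-1", b), ("1-0", c), ("1-1", d)]).modify "1-1" 0 (· + 1)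
      = PySem.Dict.mk [("0-0", a), ("0-1", b), ("1-0", c), ("1-1", d + 1)] := rfl

-- A's loop, from an arbitrary 4-key state, adds the per-cell counts of B's predicates
theorem pvLoopInv (x y : List Int) (ks : List Int) : ∀ (a b c d : Int),
    ks.foldl (pvStepA x y) (PySem.Dict.mk [("0-0", a), ("0-1", b), ("1-0", c), ("1-1", d)])
      = PySem.Dict.mk [("0-0", a + (ks.countP (pvHit x y 0 0) : Int)),
                       ("0-1", b + (ks.countP (pvHit x y 0 1) : Int)),
                       ("1-0", c + (ks.countP (pvHit x y 1 0) : Int)),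
                       ("1-1", d + (ks.countP (pvHit x y 1 1) : Int))] := by
  induction ks with
  | nil => intro a b c d; simp
  | cons k ks ih =>
    intro a b c d
    rw [List.foldl_cons]
    have hstep : pvStepA x y (PySem.Dict.mk [("0-0", a), ("0-1", b), ("1-0", c), ("1-1", d)]) k
        = PySem.Dict.mk [("0-0", a + if pvHit x y 0 0 k then 1 else 0),
                         ("0-1", b + if pvHit x y 0 1 k then 1 else 0),
                         ("1-0", c + if pvHit x y 1 0 k then 1 else 0),
                         ("1-1", d + if pvHit x y 1 1 k then 1 else 0)] := by
      unfold pvStepA pvHit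
      set i := (PySem.List.pyGet? x k).getD 0 with hi
      set j := (PySem.List.pyGet? y k).getD 0 with hj
      by_cases h0 : i = 0 <;> by_cases h1 : i = 1 <;> by_cases g0 : j = 0 <;> by_cases g1 : j = 1 <;>
        simp [h0, h1, g0, g1, pvMod00, pvMod01, pvMod10, pvMod11]
    rw [hstep, ih]
    have e : ∀ (p : Int → Bool) (v : Int),
        v + (if p k then 1 else 0) + ((ks.countP p : Nat) : Int) = v + (((k :: ks).countP p : Nat) : Int) := by
      intro p v; by_cases h : p k <;> simp [h] <;> omega
    rw [e, e, e, e]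

-- ===== VERDICT (by name: the statement is the Claim_ definition above) =====
theorem summary_binary_data2_spec : Claim_equal_summary_binary_data2 := by
  intro x y _ _
  unfold Spec_summary_binary_data2 summary_binary_data2 summary_binary_data2_alt
  rw [show (PySem.Dict.ofList [("0-0", (0:Int)), ("0-1", 0), ("1-0", 0), ("1-1", 0)])
        = PySem.Dict.mk [("0-0", 0), ("0-1", 0), ("1-0", 0), ("1-1", 0)] from rfl,
      pvLoopInv]
  simp
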